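-- pv_equiv track=rewrite | github.com/gregweg/study_reference | katas/katas_one.py | crop_board
-- ===== SOURCE A (Python) =====
-- def crop_board(board):
--     live = [(i, j) for i, r in enumerate(board) for j, v in enumerate(r) if v]
--     if not live:
--         return [[]]
--     min_i = min(i for i,_ in live)
--     max_i = max(i for i,_ in live)
--     min_j = min(j for _,j in live)
--     max_j = max(j for _,j in live)
--     return [row[min_j:max_j+1] for row in board[min_i:max_i+1]]
-- ===== SOURCE B (Python) =====
-- def crop_board(board):
--     bounds = None
--     for i, row in enumerate(board):
--         for j, v in enumerate(row):
--             if v: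
--                 if bounds is None:
--                     bounds = (i, i, j, j)
--                 else:
--                     a, b, c, d = bounds
--                     bounds = (min(a, i), max(b, i), min(c, j), max(d, j))
--     if bounds is None:
--         return [[]]
--     a, b, c, d = bounds
--     return [row[c:d+1] for row in board[a:b+1]]
-- ===== Notes on version B (the rewrite author's own statement) =====
-- stated objective: simpler
-- what changed: Replaces the intermediate list of live coordinates plus four separate min/max passes with a single fused traversal that updates one running bounds tuple.
import Mathlib
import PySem

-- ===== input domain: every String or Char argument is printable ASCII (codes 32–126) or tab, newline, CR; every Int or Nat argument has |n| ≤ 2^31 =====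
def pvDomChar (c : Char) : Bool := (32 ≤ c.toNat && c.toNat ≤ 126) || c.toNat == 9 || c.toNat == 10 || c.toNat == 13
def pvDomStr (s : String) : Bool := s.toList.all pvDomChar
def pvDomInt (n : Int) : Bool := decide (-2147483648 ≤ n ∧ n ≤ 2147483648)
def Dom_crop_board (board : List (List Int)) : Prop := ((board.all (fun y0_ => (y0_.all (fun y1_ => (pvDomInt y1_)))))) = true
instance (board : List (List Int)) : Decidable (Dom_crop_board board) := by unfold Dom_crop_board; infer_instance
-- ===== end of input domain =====

-- B replaces A's coordinate list and four min/max passes by one fused pass keeping a running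
-- bounds tuple; equal return value on every input (A mutates nothing).

-- ===== PORT A =====
-- live = [(i, j) for i, r in enumerate(board) for j, v in enumerate(r) if v]
def cropLive (board : List (List Int)) : List (Int × Int) :=
  (PySem.List.enumerate board 0).flatMap (fun p =>
    (PySem.List.enumerate p.2 0).filterMap (fun q =>
      if q.2 ≠ 0 then some (p.1, q.1) else none))

def crop_board (board : List (List Int)) : List (List Int) :=
  let live := cropLive board
  if live = [] then [[]]
  else
    -- live is nonempty here, so Python's min/max return; getD 0 is never the taken branch
    let min_i := (PySem.List.min? (live.map (·.1)) (fun y => y)).getD 0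
    let max_i := (PySem.List.max? (live.map (·.1)) (fun y => y)).getD 0
    let min_j := (PySem.List.min? (live.map (·.2)) (fun y => y)).getD 0
    let max_j := (PySem.List.max? (live.map (·.2)) (fun y => y)).getD 0
    (PySem.List.slice board (some min_i) (some (max_i + 1))).map
      (fun row => PySem.List.slice row (some min_j) (some (max_j + 1)))

-- ===== PORT B =====
def cropStep (acc : Option (Int × Int × Int × Int)) (i j : Int) :
    Option (Int × Int × Int × Int) :=
  match acc with
  | none => some (i, i, j, j)
  | some (a, b, c, d) => some (min a i, max b i, min c j, max d j)

def crop_board_alt (board : List (List Int)) : List (List Int) :=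
  let st := (PySem.List.enumerate board 0).foldl (fun acc p =>
    (PySem.List.enumerate p.2 0).foldl (fun acc q =>
      if q.2 ≠ 0 then cropStep acc p.1 q.1 else acc) acc) none
  match st with
  | none => [[]]
  | some (a, b, c, d) =>
      (PySem.List.slice board (some a) (some (b + 1))).map
        (fun row => PySem.List.slice row (some c) (some (d + 1)))

-- ===== PRECONDITION & SPEC =====
def Spec_crop_board (board : List (List Int)) (out : List (List Int)) : Prop := out = crop_board_alt board
instance (board : List (List Int)) (out : List (List Int)) : Decidable (Spec_crop_board board out) := by unfold Spec_crop_board; infer_instance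

-- ===== CLAIM (what is proved, stated in full; the proofs are below) =====
def Claim_equal_crop_board : Prop := ∀ (board : List (List Int)), Dom_crop_board board → Spec_crop_board board (crop_board board)

-- ===== LEMMAS AND PROOFS =====

-- B's nested fold equals folding cropStep over A's live coordinate list
theorem alt_fold_eq_live (board : List (List Int)) :
    (PySem.List.enumerate board 0).foldl (fun acc p =>
      (PySem.List.enumerate p.2 0).foldl (fun acc q =>
        if q.2 ≠ 0 then cropStep acc p.1 q.1 else acc) acc) none
    = (cropLive board).foldl (fun acc r => cropStep acc r.1 r.2) none := by
  unfold cropLive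
  rw [List.foldl_flatMap]
  congr 1
  funext acc p
  rw [List.foldl_filterMap]
  congr 1
  funext a q
  by_cases h : q.2 = 0 <;> simp [h]

-- folding cropStep from a `some` state is the four componentwise min/max folds
theorem fold_step_some (l : List (Int × Int)) (a b c d : Int) :
    l.foldl (fun acc r => cropStep acc r.1 r.2) (some (a, b, c, d))
    = some (l.foldl (fun x r => min x r.1) a, l.foldl (fun x r => max x r.1) b,
            l.foldl (fun x r => min x r.2) c, l.foldl (fun x r => max x r.2) d) := by
  induction l generalizing a b c d with
  | nil => rfl
  | cons h t ih =>
      simp only [List.foldl_cons, cropStep]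
      exact ih _ _ _ _

theorem crop_board_eq (board : List (List Int)) :
    crop_board board = crop_board_alt board := by
  unfold crop_board crop_board_alt
  rw [alt_fold_eq_live]
  cases hl : cropLive board with
  | nil => simp
  | cons p t =>
      rw [List.foldl_cons,
        show cropStep none p.1 p.2 = some (p.1, p.1, p.2, p.2) from rfl,
        fold_step_some]
      have h1 : (p :: t).map (·.1) = p.1 :: t.map (·.1) := rfl
      have h2 : (p :: t).map (·.2) = p.2 :: t.map (·.2) := rfl
      simp only [h1, h2, PySem.List.min?_id_cons, PySem.List.max?_id_cons,
        Option.getD_some, List.foldl_map]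
      simp

-- ===== VERDICT (by name: the statement is the Claim_ definition above) =====
theorem crop_board_spec : Claim_equal_crop_board := by
  intro board _
  unfold Spec_crop_board
  exact crop_board_eq board
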